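-- pv_equiv track=rewrite | github.com/kim-hyunjin/learning-code-archive | algorithms/python-quiz/inflearn/stackqueue/curriculum.py | solution
-- ===== SOURCE A (Python) =====
-- from collections import deque
--
-- def solution(essential, plan):
--     q = deque()
--     for e in essential:
--         q.append(e)
--
--     for p in plan:
--         if q.__contains__(p):
--             if q[0] == p:
--                 q.popleft()
--             else:
--                 return False
--     return len(q) == 0
-- ===== SOURCE B (Python) =====
-- from collections import Counter
--
-- def solution(essential, plan):
--     # front pointer into essential + Counter of the remaining multiset
--     remaining = Counter(essential)
--     i = 0
--     n = len(essential)
--     for p in plan: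
--         if remaining[p] > 0:
--             if essential[i] == p:
--                 i += 1
--                 remaining[p] -= 1
--             else:
--                 return False
--     return i == n
-- ===== Notes on version B (the rewrite author's own statement) =====
-- stated objective: alternative
-- what changed: replaced the deque with per-item __contains__ scans by a front pointer into essential plus a Counter of the remaining multiset, so membership is a dict lookup instead of a queue scan
import Mathlib
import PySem

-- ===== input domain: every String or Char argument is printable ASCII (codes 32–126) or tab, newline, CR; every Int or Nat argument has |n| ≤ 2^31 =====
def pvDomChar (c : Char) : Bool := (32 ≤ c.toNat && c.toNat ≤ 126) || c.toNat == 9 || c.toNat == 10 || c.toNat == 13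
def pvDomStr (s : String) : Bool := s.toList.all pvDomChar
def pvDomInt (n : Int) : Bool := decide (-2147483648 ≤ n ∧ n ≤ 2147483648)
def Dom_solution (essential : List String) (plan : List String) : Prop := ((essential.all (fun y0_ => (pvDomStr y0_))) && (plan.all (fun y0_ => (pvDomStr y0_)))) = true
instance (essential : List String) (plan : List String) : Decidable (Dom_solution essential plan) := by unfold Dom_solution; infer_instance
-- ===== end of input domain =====

-- B replaces A's per-item deque membership scan by a front pointer + Counter of the remaining multiset (alternative algorithm).


-- ===== PORT A =====
-- the 'for p in plan' loop, carrying the deque q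
def solGoA (q : List String) (plan : List String) : Bool :=
  match plan with
  | [] => q.length == 0
  | p :: rest =>
    if q.contains p then
      -- q is nonempty here (p ∈ q), so q[0] is q.head?
      if q.head? == some p then solGoA q.tail rest else false
    else solGoA q rest

def solution (essential : List String) (plan : List String) : Bool :=
  solGoA (essential.foldl (fun acc e => acc ++ [e]) []) plan

-- ===== PORT B =====
-- the 'for p in plan' loop, carrying the front pointer i and the Counter of remaining elements
def solGoB (essential : List String) (n : Int) (i : Int) (cnt : PySem.Dict String Int)
    (plan : List String) : Bool :=
  match plan with
  | [] => i == n
  | p :: rest =>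
    if 0 < cnt.getD p 0 then
      if PySem.List.pyGet? essential i == some p then
        solGoB essential n (i + 1) (cnt.insert p (cnt.getD p 0 - 1)) rest
      else false
    else solGoB essential n i cnt rest

def solution_alt (essential : List String) (plan : List String) : Bool :=
  solGoB essential (essential.length : Int) 0 (PySem.Dict.counter essential) plan

-- ===== PRECONDITION & SPEC =====
def Spec_solution (essential : List String) (plan : List String) (out : Bool) : Prop := out = solution_alt essential plan
instance (essential : List String) (plan : List String) (out : Bool) : Decidable (Spec_solution essential plan out) := by unfold Spec_solution; infer_instance

-- ===== CLAIM (what is proved, stated in full; the proofs are below) =====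
def Claim_equal_solution : Prop := ∀ (essential : List String) (plan : List String), Dom_solution essential plan → Spec_solution essential plan (solution essential plan)

-- ===== LEMMAS AND PROOFS =====
theorem foldl_append_id (l : List String) (acc : List String) :
    l.foldl (fun acc e => acc ++ [e]) acc = acc ++ l := by
  induction l generalizing acc with
  | nil => simp
  | cons x xs ih => simp [List.foldl, ih]

-- invariant: q is the remaining suffix essential.drop i, and cnt counts q's multiset
theorem solGo_eq (plan : List String) (essential : List String) (i : Nat)
    (cnt : PySem.Dict String Int)
    (hi : i ≤ essential.length)
    (hcnt : ∀ p, cnt.getD p 0 = ((essential.drop i).count p : Int)) :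
    solGoA (essential.drop i) plan
      = solGoB essential (essential.length : Int) (i : Int) cnt plan := by
  induction plan generalizing i cnt with
  | nil =>
    simp only [solGoA, solGoB]
    rw [Bool.eq_iff_iff]
    simp only [beq_iff_eq, List.length_drop]
    omega
  | cons p rest ih =>
    simp only [solGoA, solGoB]
    have hmem : (essential.drop i).contains p = decide (p ∈ essential.drop i) := by
      simp
    by_cases hp : p ∈ essential.drop i
    · have hcntp : 0 < cnt.getD p 0 := by
        rw [hcnt p]; exact_mod_cast List.count_pos_iff.mpr hp
      have hne : essential.drop i ≠ [] := by
        intro h; rw [h] at hp; exact absurd hp (List.not_mem_nil)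
      have hlt : i < essential.length := by
        by_contra h
        exact hne (List.drop_eq_nil_of_le (by omega))
      have hget : PySem.List.pyGet? essential (i : Int) = essential[i]? := by
        rw [PySem.List.pyGet?_natCast]
      have hhead : (essential.drop i).head? = essential[i]? := List.head?_drop
      simp only [hmem, hp, decide_true, if_true, hcntp, hget, ← hhead]
      obtain ⟨x, xs, hq⟩ := List.exists_cons_of_ne_nil hne
      rw [hq]
      by_cases hx : x = p
      · subst hx
        simp only [List.head?_cons, beq_self_eq_true, if_true, List.tail_cons]
        have htail : xs = essential.drop (i + 1) := by
          have h2 : (essential.drop i).tail = essential.drop (i + 1) := List.tail_drop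
          rw [hq] at h2; simpa using h2
        rw [htail]
        have := ih (i + 1) (cnt.insert x (cnt.getD x 0 - 1)) (by omega) (by
          intro p'
          rw [PySem.Dict.getD_insert]
          by_cases hpp : p' = x
          · subst hpp
            rw [if_pos rfl, hcnt p', hq, ← htail]
            simp
          · rw [if_neg hpp, hcnt p', hq, ← htail]
            simp only [List.count_cons, beq_iff_eq, Nat.cast_add]
            have hxp : ¬ (x = p') := fun h => hpp h.symm
            simp [hxp])
        rw [this]
        norm_cast
      · have hxb : (some x == some p) = false := by
          simp [hx]
        simp [hxb]
    · have hcntp : ¬ 0 < cnt.getD p 0 := by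
        rw [hcnt p]
        simp [List.count_eq_zero_of_not_mem hp]
      simp only [hmem, hp, decide_false, if_false, hcntp]
      exact ih i cnt hi hcnt

-- ===== VERDICT (by name: the statement is the Claim_ definition above) =====
theorem solution_spec : Claim_equal_solution := by
  intro essential plan _
  unfold Spec_solution solution solution_alt
  rw [foldl_append_id, List.nil_append]
  have h := solGo_eq plan essential 0 (PySem.Dict.counter essential) (Nat.zero_le _)
    (by intro p; simpa using PySem.Dict.getD_counter essential p)
  simpa using h
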